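-- pv_equiv track=rewrite | github.com/HoGyeongC/Baekjoon | 프로그래머스/unrated/120904. 숫자 찾기/숫자 찾기.py | solution
-- ===== SOURCE A (Python) =====
-- def solution(num, k):
--     i=0
--     Max = 0
--     while num >0:
--         i+=1
--         if num % 10 == k:
--             Max = i
--         num = num // 10
--
--     if Max != 0:
--         return i-Max+1
--     return -1
-- ===== SOURCE B (Python) =====
-- def solution(num, k):
--     if num <= 0:
--         return -1
--     for idx, ch in enumerate(str(num)):
--         if int(ch) == k:
--             return idx + 1
--     return -1
-- ===== Notes on version B (the rewrite author's own statement) =====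
-- stated objective: idiomatic
-- what changed: Replaces the right-to-left %10///10 scan that tracks the last-match counter with a left-to-right scan of str(num) that returns at the first matching digit.
import Mathlib
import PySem

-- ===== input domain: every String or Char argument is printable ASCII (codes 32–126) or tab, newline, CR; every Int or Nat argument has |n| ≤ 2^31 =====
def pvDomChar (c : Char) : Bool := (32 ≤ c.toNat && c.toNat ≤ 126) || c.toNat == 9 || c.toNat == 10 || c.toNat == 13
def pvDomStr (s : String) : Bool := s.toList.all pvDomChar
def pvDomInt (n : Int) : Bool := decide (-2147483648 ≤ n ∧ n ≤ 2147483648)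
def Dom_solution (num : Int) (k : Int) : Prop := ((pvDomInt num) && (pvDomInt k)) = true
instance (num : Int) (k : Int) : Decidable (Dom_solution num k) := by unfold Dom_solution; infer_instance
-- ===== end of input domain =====

-- B replaces A's right-to-left %10-//10 scan tracking the last match with a
-- left-to-right scan of str(num) that returns at the first matching digit (idiomatic).

-- ===== PORT A =====
-- the while loop of A, state (num, i, Max)
def solLoop (num : Int) (i : Int) (Max : Int) (k : Int) : Int × Int :=
  if 0 < num then
    let i' := i + 1
    let Max' := if PySem.Int.mod num 10 = k then i' else Max
    solLoop (PySem.Int.floordiv num 10) i' Max' k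
  else (i, Max)
termination_by num.toNat
decreasing_by
  rename_i h
  rw [PySem.Int.floordiv_eq_ediv_of_pos (by norm_num : (0:Int) < 10)]
  omega

def solution (num : Int) (k : Int) : Int :=
  let p := solLoop num 0 0 k
  if p.2 ≠ 0 then p.1 - p.2 + 1 else -1

-- ===== PORT B =====
-- the for loop of B over str(num); int(ch) is ported as ofChars? [c], totalized
-- with .getD 0 (it is never none: every scanned character is a decimal digit)
def altGo (k : Int) : List Char → Int → Int
  | [], _ => -1
  | c :: cs, idx =>
    if (PySem.Int.ofChars? [c]).getD 0 = k then idx + 1 else altGo k cs (idx + 1)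

def solution_alt (num : Int) (k : Int) : Int :=
  if num ≤ 0 then -1
  else altGo k (PySem.Int.toStr num).toList 0

-- ===== PRECONDITION & SPEC =====
def Spec_solution (num : Int) (k : Int) (out : Int) : Prop := out = solution_alt num k
instance (num : Int) (k : Int) (out : Int) : Decidable (Spec_solution num k out) := by unfold Spec_solution; infer_instance

-- ===== CLAIM (what is proved, stated in full; the proofs are below) =====
def Claim_equal_solution : Prop := ∀ (num : Int) (k : Int), Dom_solution num k → Spec_solution num k (solution num k)

-- ===== LEMMAS AND PROOFS =====

-- index (0-based) of the LAST element of a LSB-first digit list equal to k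
def lastIdx? (k : Int) : List Nat → Option Nat
  | [] => none
  | d :: ds =>
    match lastIdx? k ds with
    | some j => some (j + 1)
    | none => if (d : Int) = k then some 0 else none

-- index (0-based) of the FIRST element equal to k
def firstIdx? (k : Int) : List Nat → Option Nat
  | [] => none
  | d :: ds => if (d : Int) = k then some 0 else (firstIdx? k ds).map (· + 1)

theorem lastIdx?_lt {k : Int} {ds : List Nat} {j : Nat} (h : lastIdx? k ds = some j) :
    j < ds.length := by
  induction ds generalizing j with
  | nil => simp [lastIdx?] at h
  | cons d ds ih =>
    simp only [lastIdx?] at h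
    cases hds : lastIdx? k ds with
    | some j' => rw [hds] at h; simp at h; have := ih hds; simp [List.length]; omega
    | none => rw [hds] at h; split at h <;> simp_all <;> omega

theorem firstIdx?_append (k : Int) (xs ys : List Nat) :
    firstIdx? k (xs ++ ys) =
      match firstIdx? k xs with
      | some m => some m
      | none => (firstIdx? k ys).map (· + xs.length) := by
  induction xs with
  | nil => simp [firstIdx?]
  | cons d xs ih =>
    simp only [List.cons_append, firstIdx?, ih]
    split
    · rfl
    · cases firstIdx? k xs <;> cases firstIdx? k ys <;> simp [List.length] <;> omega

theorem firstIdx?_reverse (k : Int) (ds : List Nat) :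
    firstIdx? k ds.reverse = (lastIdx? k ds).map (fun j => ds.length - 1 - j) := by
  induction ds with
  | nil => simp [firstIdx?, lastIdx?]
  | cons d ds ih =>
    simp only [List.reverse_cons, firstIdx?_append, ih, lastIdx?]
    cases hds : lastIdx? k ds with
    | some j =>
      have hj := lastIdx?_lt hds
      simp only [Option.map_some]
      simp [List.length]
      omega
    | none =>
      simp only [Option.map_none]
      split <;> simp [firstIdx?, *, List.length_reverse]

-- A's loop, characterised by the LSB-first digit list of num
theorem solLoop_spec (k : Int) : ∀ (n i Max : Int), 0 ≤ n →
    solLoop n i Max k =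
      (i + (Nat.digits 10 n.toNat).length,
       match lastIdx? k (Nat.digits 10 n.toNat) with
       | some j => i + j + 1
       | none => Max) := by
  have main : ∀ (m : Nat) (n i Max : Int), 0 ≤ n → n.toNat ≤ m →
      solLoop n i Max k =
        (i + (Nat.digits 10 n.toNat).length,
         match lastIdx? k (Nat.digits 10 n.toNat) with
         | some j => i + j + 1
         | none => Max) := by
    intro m
    induction m with
    | zero =>
      intro n i Max hn hm
      have hz : n = 0 := by omega
      rw [solLoop]
      simp [hz, lastIdx?]
    | succ m ih =>
      intro n i Max hn hm
      rw [solLoop]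
      by_cases hpos : 0 < n
      · simp only [if_pos hpos]
        have h10 : (0:Int) < 10 := by norm_num
        rw [PySem.Int.floordiv_eq_ediv_of_pos h10, PySem.Int.mod_eq_emod_of_pos h10]
        have hrec := ih (n / 10) (i + 1)
          (if n % 10 = k then i + 1 else Max) (by omega) (by omega)
        rw [hrec]
        have htn : (n / 10).toNat = n.toNat / 10 := by omega
        have hdig : Nat.digits 10 n.toNat = n.toNat % 10 :: Nat.digits 10 (n.toNat / 10) :=
          Nat.digits_def' (by norm_num) (by omega)
        have hmod : n % 10 = ((n.toNat % 10 : Nat) : Int) := by omega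
        rw [htn, hdig]
        simp only [lastIdx?, List.length_cons]
        cases hL : lastIdx? k (Nat.digits 10 (n.toNat / 10)) with
        | some j => simp; omega
        | none =>
          rw [hmod]
          by_cases hk : ((n.toNat % 10 : Nat) : Int) = k
          · rw [if_pos hk]; rw [if_pos hk]
            simp only [Prod.mk.injEq]
            constructor
            · push_cast; omega
            · simp
          · rw [if_neg hk]; rw [if_neg hk]
            simp only [Prod.mk.injEq]
            constructor
            · push_cast; omega
            · simp
      · have hz : n = 0 := by omega
        rw [solLoop]
        simp [hz, lastIdx?]
  intro n i Max hn
  exact main n.toNat n i Max hn le_rfl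

-- toDigitsCore produces the reversed MSB digit characters
theorem toDigitsCore_eq (f : Nat) : ∀ (n : Nat) (l : List Char), 0 < n → n ≤ f →
    Nat.toDigitsCore 10 f n l = ((Nat.digits 10 n).map Nat.digitChar).reverse ++ l := by
  induction f with
  | zero => intro n l h1 h2; omega
  | succ f ih =>
    intro n l h1 h2
    rw [Nat.toDigitsCore]
    have hdig : Nat.digits 10 n = n % 10 :: Nat.digits 10 (n / 10) :=
      Nat.digits_def' (by norm_num) h1
    by_cases hz : n / 10 = 0
    · simp only [hz, if_pos]
      rw [hdig, hz]
      simp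
    · simp only [hz, ite_false]
      rw [ih (n / 10) _ (by omega) (by omega), hdig]
      simp

theorem toChars_pos (n : Int) (hn : 0 < n) :
    PySem.Int.toChars n = ((Nat.digits 10 n.toNat).map Nat.digitChar).reverse := by
  unfold PySem.Int.toChars
  rw [if_neg (by omega)]
  rw [Nat.toDigits, toDigitsCore_eq (n.toNat + 1) n.toNat [] (by omega) (by omega)]
  simp

theorem ofChars_digitChar (d : Nat) (hd : d < 10) :
    (PySem.Int.ofChars? [Nat.digitChar d]).getD 0 = (d : Int) := by
  interval_cases d <;> decide

theorem altGo_spec (k : Int) (es : List Nat) (h : ∀ d ∈ es, d < 10) : ∀ (idx : Int),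
    altGo k (es.map Nat.digitChar) idx =
      match firstIdx? k es with
      | some m => idx + m + 1
      | none => -1 := by
  induction es with
  | nil => intro idx; simp [altGo, firstIdx?]
  | cons d ds ih =>
    intro idx
    simp only [List.map_cons, altGo, firstIdx?]
    rw [ofChars_digitChar d (h d (by simp))]
    by_cases hk : (d : Int) = k
    · simp [hk]
    · rw [if_neg hk, if_neg hk, ih (fun x hx => h x (by simp [hx]))]
      cases firstIdx? k ds <;> simp <;> omega

-- ===== VERDICT (by name: the statement is the Claim_ definition above) =====
theorem solution_spec : Claim_equal_solution := by
  intro num k _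
  unfold Spec_solution
  simp only [solution, solution_alt]
  by_cases hpos : 0 < num
  · rw [if_neg (show ¬ num ≤ 0 by omega)]
    rw [solLoop_spec k num 0 0 (by omega)]
    rw [PySem.Int.toList_toStr, toChars_pos num hpos, ← List.map_reverse]
    rw [altGo_spec k _ (fun d hd => Nat.digits_lt_base (by norm_num)
      (by simpa using hd)) 0]
    rw [firstIdx?_reverse]
    cases hL : lastIdx? k (Nat.digits 10 num.toNat) with
    | some j =>
      have hj := lastIdx?_lt hL
      simp only [Option.map_some]
      have h1 : (0:Int) + (j:Int) + 1 ≠ 0 := by omega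
      simp only [h1, ne_eq, not_false_eq_true, ite_true]
      have key : ∀ (L j : Nat), j < L →
          0 + (L:Int) - (0 + (j:Int) + 1) + 1 = 0 + ((L - 1 - j : Nat):Int) + 1 := by
        intro L j h; omega
      exact key _ j hj
    | none => simp
  · rw [if_pos (show num ≤ 0 by omega)]
    rw [solLoop]
    simp [hpos]
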